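-- pv_equiv track=rewrite | github.com/adoggie/Tibet.6 | BlackLocust/Futures/scripts/base_function.py | cal_maxdt
-- ===== SOURCE A (Python) =====
-- def cal_maxdt(profit):
--     # 计算最长回撤时间，返回周期数和开始结束index
--     maxdt = 0
--     temp_max_value = 0
--     begin_index = 0
--     end_index = 0
--     temp_begin = 0
--     for i in range(1, len(profit)):
--         if profit[i-1] > temp_max_value:
--             temp_max_value = profit[i-1]
--             temp_begin = i
--         else:
--             if i-temp_begin > maxdt:
--                 maxdt = i-temp_begin
--                 begin_index = temp_begin
--                 end_index = i
--             else:
--                 pass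
--     return maxdt, begin_index, end_index
-- ===== SOURCE B (Python) =====
-- def cal_maxdt(profit):
--     n = len(profit)
--     # pass 1: markers = index i such that profit[i-1] sets a new strict running high (start 0)
--     markers = []
--     m = 0
--     for p in range(n - 1):
--         if profit[p] > m:
--             m = profit[p]
--             markers.append(p + 1)
--     # pass 2: segment starts; each segment [s, t) contributes candidate duration (t-1)-s
--     starts = [0] + markers
--     maxdt, begin_index, end_index = 0, 0, 0
--     for j, s in enumerate(starts):
--         t = starts[j + 1] if j + 1 < len(starts) else n
--         cand = (t - 1) - s
--         if cand > maxdt: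
--             maxdt, begin_index, end_index = cand, s, s + cand
--     return maxdt, begin_index, end_index
-- ===== Notes on version B (the rewrite author's own statement) =====
-- stated objective: alternative
-- what changed: Replaces A's single stateful sweep (running max, tentative segment start and best-so-far all mutated in one loop) by two independent passes: first collect the new-high marker indices, then walk the resulting segment starts and compare each segment's closed-form duration (t-1)-s against the best, doing one comparison per segment instead of one per element.
import Mathlib
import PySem

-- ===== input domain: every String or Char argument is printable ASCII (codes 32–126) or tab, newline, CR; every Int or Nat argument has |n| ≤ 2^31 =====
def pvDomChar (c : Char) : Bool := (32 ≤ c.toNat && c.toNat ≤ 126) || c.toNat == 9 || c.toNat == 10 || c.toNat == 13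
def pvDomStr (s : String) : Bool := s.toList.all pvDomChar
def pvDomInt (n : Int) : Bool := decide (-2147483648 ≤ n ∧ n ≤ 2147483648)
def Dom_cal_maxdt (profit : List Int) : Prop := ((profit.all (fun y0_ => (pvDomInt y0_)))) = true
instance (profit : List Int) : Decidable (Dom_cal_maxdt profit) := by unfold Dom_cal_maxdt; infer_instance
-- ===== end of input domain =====

-- B recomputes A's result by a two-pass decomposition (collect new-high markers, then compare per-segment closed-form durations); a timing run measured it constant-factor faster; proved to return A's exact value.

-- ===== PORT A =====
-- A's loop "for i in range(1, len(profit))" reads profit[i-1], i.e. it walks the first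
-- len(profit)-1 elements in order while counting i; ported as structural recursion over
-- that element list with the index counter i carried along (same state, same branch order).
-- state = (maxdt, temp_max_value, begin_index, end_index, temp_begin)
def calLoopA : List Int → Int → Int × Int × Int × Int × Int → Int × Int × Int × Int × Int
  | [], _, st => st
  | v :: vs, i, (maxdt, tmv, bi, ei, tb) =>
      calLoopA vs (i + 1)
        (if v > tmv then (maxdt, v, bi, ei, i)
         else if i - tb > maxdt then (i - tb, tmv, tb, i, tb)
         else (maxdt, tmv, bi, ei, tb))

def cal_maxdt (profit : List Int) : Int × Int × Int :=
  let st := calLoopA (profit.take (profit.length - 1)) 1 (0, 0, 0, 0, 0)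
  (st.1, st.2.2.1, st.2.2.2.1)

-- ===== PORT B =====
-- pass 1 of Source B: markers (appended left to right = cons-built list), running max m, position p
def calMarkers : List Int → Int → Int → List Int
  | [], _, _ => []
  | v :: vs, p, m => if v > m then (p + 1) :: calMarkers vs (p + 1) v else calMarkers vs (p + 1) m

-- pass 2 of Source B: walk the starts with one-ahead lookup (t = next start, or n at the end)
def calScan (n : Int) : List Int → Int × Int × Int → Int × Int × Int
  | [], st => st
  | s :: rest, (maxdt, bi, ei) =>
      let t := match rest with | [] => n | t :: _ => t
      let cand := (t - 1) - s
      calScan n rest (if cand > maxdt then (cand, s, s + cand) else (maxdt, bi, ei))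

def cal_maxdt_alt (profit : List Int) : Int × Int × Int :=
  let n : Int := profit.length
  let markers := calMarkers (profit.take (profit.length - 1)) 0 0
  calScan n (0 :: markers) (0, 0, 0)

-- ===== PRECONDITION & SPEC =====
def Spec_cal_maxdt (profit : List Int) (out : Int × Int × Int) : Prop := out = cal_maxdt_alt profit
instance (profit : List Int) (out : Int × Int × Int) : Decidable (Spec_cal_maxdt profit out) := by unfold Spec_cal_maxdt; infer_instance

-- ===== CLAIM (what is proved, stated in full; the proofs are below) =====
def Claim_equal_cal_maxdt : Prop := ∀ (profit : List Int), Dom_cal_maxdt profit → Spec_cal_maxdt profit (cal_maxdt profit)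

-- ===== LEMMAS AND PROOFS =====

-- every marker produced from position p is ≥ p+1
theorem calMarkers_head_ge : ∀ (vs : List Int) (p m t : Int) (ts : List Int),
    calMarkers vs p m = t :: ts → p + 1 ≤ t := by
  intro vs
  induction vs with
  | nil => intro p m t ts h; simp [calMarkers] at h
  | cons v vs ih =>
      intro p m t ts h
      simp only [calMarkers] at h
      split at h
      · cases h; omega
      · have := ih (p + 1) m t ts h; omega

-- one unfolding step of the scan on an explicit two-element head
theorem calScan_cons2 (n s t : Int) (ts : List Int) (m bi ei : Int) :
    calScan n (s :: t :: ts) (m, bi, ei)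
      = calScan n (t :: ts) (if t - 1 - s > m then (t - 1 - s, s, s + (t - 1 - s)) else (m, bi, ei)) := rfl

-- the segment scan absorbs an earlier (smaller) candidate update for the same start
theorem calScan_absorb (n : Int) (M : List Int) (s c : Int) (st : Int × Int × Int)
    (hc : c ≤ (match M with | [] => n | t :: _ => t) - 1 - s) :
    calScan n (s :: M) (if c > st.1 then (c, s, s + c) else st)
      = calScan n (s :: M) st := by
  obtain ⟨m, bi, ei⟩ := st
  rcases M with _ | ⟨t, ts⟩
  · have hc' : c ≤ n - 1 - s := by simpa using hc
    simp only [calScan]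
    split_ifs <;> first
      | rfl
      | (simp_all; omega)
  · have hc' : c ≤ t - 1 - s := by simpa using hc
    simp only [calScan]
    split_ifs <;> first
      | rfl
      | (simp_all; omega)
      | (congr 1; simp_all [Prod.mk.injEq]; omega)

-- main invariant: A's loop from index i with segment start tb equals B's scan over
-- (tb :: future markers), given that the candidate of step i-1 is already absorbed
theorem loopA_eq_scan : ∀ (vs : List Int) (i maxdt tmv bi ei tb : Int),
    0 ≤ maxdt → i - 1 - tb ≤ maxdt →
    (fun st : Int × Int × Int × Int × Int => (st.1, st.2.2.1, st.2.2.2.1))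
        (calLoopA vs i (maxdt, tmv, bi, ei, tb))
      = calScan (i + (vs.length : Int)) (tb :: calMarkers vs (i - 1) tmv) (maxdt, bi, ei) := by
  intro vs
  induction vs with
  | nil =>
      intro i maxdt tmv bi ei tb h0 h1
      simp only [calLoopA, calMarkers, calScan, List.length_nil, Nat.cast_zero]
      split_ifs with h
      · exfalso; omega
      · rfl
  | cons v vs ih =>
      intro i maxdt tmv bi ei tb h0 h1
      have hlen : i + (((v :: vs).length : Nat) : Int) = (i + 1) + (vs.length : Int) := by
        simp; ring
      simp only [calLoopA, calMarkers]
      rw [show i - 1 + 1 = i from by omega, hlen]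
      by_cases hv : v > tmv
      · -- marker case: new segment starts at i
        rw [if_pos hv, if_pos hv, calScan_cons2, if_neg (by omega : ¬ i - 1 - tb > maxdt)]
        have h := ih (i + 1) maxdt v bi ei i h0 (by omega)
        rw [show i + 1 - 1 = i from by omega] at h
        exact h
      · -- non-marker case: candidate i - tb, same segment start tb
        rw [if_neg hv, if_neg hv]
        by_cases hcand : i - tb > maxdt
        · rw [if_pos hcand]
          have h := ih (i + 1) (i - tb) tmv tb i tb (by omega) (by omega)
          rw [show i + 1 - 1 = i from by omega] at h
          have hbound : i - tb ≤ (match calMarkers vs i tmv with | [] => (i + 1) + (vs.length : Int) | t :: _ => t) - 1 - tb := by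
            rcases hM : calMarkers vs i tmv with _ | ⟨t, ts⟩
            · show i - tb ≤ (i + 1) + (vs.length : Int) - 1 - tb
              omega
            · have := calMarkers_head_ge vs i tmv t ts hM
              show i - tb ≤ t - 1 - tb
              omega
          have habs := calScan_absorb ((i + 1) + (vs.length : Int)) (calMarkers vs i tmv)
            tb (i - tb) (maxdt, bi, ei) hbound
          rw [if_pos (show i - tb > (maxdt, bi, ei).1 from hcand)] at habs
          rw [show tb + (i - tb) = i from by omega] at habs
          exact h.trans habs
        · rw [if_neg hcand]
          have h := ih (i + 1) maxdt tmv bi ei tb h0 (by omega)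
          rw [show i + 1 - 1 = i from by omega] at h
          exact h

-- ===== VERDICT (by name: the statement is the Claim_ definition above) =====
theorem cal_maxdt_spec : Claim_equal_cal_maxdt := by
  intro profit _
  unfold Spec_cal_maxdt cal_maxdt cal_maxdt_alt
  rcases profit with _ | ⟨x, xs⟩
  · decide
  · have h := loopA_eq_scan ((x :: xs).take ((x :: xs).length - 1)) 1 0 0 0 0 0
      (by omega) (by omega)
    simp only at h
    rw [show (1:Int) - 1 = 0 from rfl] at h
    have hlen : (1:Int) + ((((x :: xs).take ((x :: xs).length - 1)).length : Nat) : Int)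
        = (((x :: xs).length : Nat) : Int) := by
      simp [List.length_take]; omega
    rw [hlen] at h
    exact h
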